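-- pv_equiv track=rewrite | github.com/azmsu/twitter-sentiment | buildarff.py | feat13
-- ===== SOURCE A (Python) =====
-- def feat13(tweet):
--     '''
--     finds number of proper nouns in tweet
--     :param tweet: string containing tweet
--     :return: number of proper nouns in tweet
--     '''
--     count = 0
--     tweet = tweet.lower()
--     for token in tweet.split():
--         index = token.rfind('/')
--         if token[index + 1:] in ['nnp', 'nnps']:
--             count += 1
--     return count
-- ===== SOURCE B (Python) =====
-- def feat13(tweet):
--     '''
--     finds number of proper nouns in tweet (single character scan, no tokenize/rfind)
--     :param tweet: string containing tweet
--     :return: number of proper nouns in tweet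
--     '''
--     count = 0
--     buf = ''
--     for c in tweet.lower() + ' ':
--         if c.isspace():
--             if buf in ('nnp', 'nnps'):
--                 count += 1
--             buf = ''
--         elif c == '/':
--             buf = ''
--         else:
--             buf += c
--     return count
-- ===== Notes on version B (the rewrite author's own statement) =====
-- stated objective: alternative
-- what changed: B replaces A's tokenize-then-rfind-then-slice pipeline with a single character-by-character scan that maintains the suffix since the last slash/whitespace and counts it at each token boundary.
import Mathlib
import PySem

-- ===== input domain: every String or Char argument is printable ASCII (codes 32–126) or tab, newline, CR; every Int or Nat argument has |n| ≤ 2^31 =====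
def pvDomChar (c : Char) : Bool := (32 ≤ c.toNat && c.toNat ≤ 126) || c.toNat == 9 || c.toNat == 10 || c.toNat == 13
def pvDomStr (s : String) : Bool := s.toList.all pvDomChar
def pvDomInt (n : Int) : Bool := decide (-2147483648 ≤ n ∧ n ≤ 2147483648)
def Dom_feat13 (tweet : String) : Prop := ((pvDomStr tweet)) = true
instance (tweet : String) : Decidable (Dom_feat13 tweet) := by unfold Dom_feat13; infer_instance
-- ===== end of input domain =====

-- B replaces A's tokenize/rfind/slice pipeline with a single character scan; same O(n) cost, different structure.

-- ===== PORT A =====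
def feat13 (tweet : String) : Int :=
  let tw := PySem.Str.lower tweet
  (PySem.Str.split₀ tw).foldl
    (fun count token =>
      let index := PySem.Str.rfind token "/"
      if PySem.Str.slice token (some (index + 1)) none ∈ (["nnp", "nnps"] : List String)
      then count + 1 else count) 0

-- ===== PORT B =====
def feat13_alt (tweet : String) : Int :=
  (((PySem.Str.lower tweet).toList ++ [' ']).foldl
    (fun st c =>
      if PySem.Chars.isspace c then
        (if st.2 = "nnp".toList ∨ st.2 = "nnps".toList then st.1 + 1 else st.1, ([] : List Char))
      else if c = '/' then (st.1, [])
      else (st.1, st.2 ++ [c]))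
    ((0 : Int), ([] : List Char))).1

-- ===== PRECONDITION & SPEC =====
def Spec_feat13 (tweet : String) (out : Int) : Prop := out = feat13_alt tweet
instance (tweet : String) (out : Int) : Decidable (Spec_feat13 tweet out) := by unfold Spec_feat13; infer_instance

-- ===== CLAIM (what is proved, stated in full; the proofs are below) =====
def Claim_equal_feat13 : Prop := ∀ (tweet : String), Dom_feat13 tweet → Spec_feat13 tweet (feat13 tweet)

-- ===== LEMMAS AND PROOFS =====

-- the suffix of `t` after its last '/' (whole `t` if it has no '/')
def tailAfter : List Char → List Char
  | [] => []
  | c :: t => if '/' ∈ t then tailAfter t else if c = '/' then t else c :: t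

-- the per-token predicate both programs decide
def pTok (tok : List Char) : Bool := decide (tailAfter tok = "nnp".toList ∨ tailAfter tok = "nnps".toList)

lemma tailAfter_append (t : List Char) (c : Char) :
    tailAfter (t ++ [c]) = if c = '/' then [] else tailAfter t ++ [c] := by
  induction t with
  | nil => by_cases h : c = '/' <;> simp [tailAfter, h]
  | cons d t ih =>
      by_cases hc : c = '/'
      · subst hc
        simp [tailAfter, ih]
      · by_cases hm : '/' ∈ t
        · simp [tailAfter, hm, hc, ih]
        · by_cases hd : d = '/' <;>
            · simp [tailAfter, hm, hc, hd, ih]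
              intro h; exact absurd h.symm hc

lemma rfind_go_cons (t : List Char) (c : Char) (n : Nat) :
    PySem.Chars.rfind.go (c :: t) ['/'] (n + 1) =
      (if PySem.Chars.rfind.go t ['/'] n = -1 then (if c = '/' then 0 else -1)
       else PySem.Chars.rfind.go t ['/'] n + 1) := by
  induction n with
  | zero =>
      simp only [PySem.Chars.rfind.go]
      by_cases h : ['/'].isPrefixOf t
      · simp [h]
      · simp [h, List.isPrefixOf]
        by_cases hc : c = '/'
        · simp [hc]
        · simp [hc]
          exact fun hh => hc hh.symm
  | succ n ih =>
      rw [show PySem.Chars.rfind.go (c :: t) ['/'] (n + 1 + 1) =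
            (if ['/'].isPrefixOf (List.drop (n + 1 + 1) (c :: t)) then ((n : Int) + 1 + 1)
             else PySem.Chars.rfind.go (c :: t) ['/'] (n + 1)) from rfl,
          show PySem.Chars.rfind.go t ['/'] (n + 1) =
            (if ['/'].isPrefixOf (List.drop (n + 1) t) then ((n : Int) + 1)
             else PySem.Chars.rfind.go t ['/'] n) from rfl,
          List.drop_succ_cons]
      by_cases h : ['/'].isPrefixOf (List.drop (n + 1) t)
      · simp [h]
        omega
      · simp [h, ih]

lemma rfind_cons_raw (t : List Char) (c : Char) :
    PySem.Chars.rfind (c :: t) ['/'] =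
      (if PySem.Chars.rfind t ['/'] = -1 then (if c = '/' then 0 else -1)
       else PySem.Chars.rfind t ['/'] + 1) := by
  rw [show PySem.Chars.rfind (c :: t) ['/'] =
        PySem.Chars.rfind.go (c :: t) ['/'] (t.length + 1) from rfl,
      rfind_go_cons]
  rfl

lemma rfind_basic (t : List Char) :
    -1 ≤ PySem.Chars.rfind t ['/'] ∧ (PySem.Chars.rfind t ['/'] = -1 ↔ '/' ∉ t) := by
  induction t with
  | nil => simp [PySem.Chars.rfind, PySem.Chars.rfind.go, List.isPrefixOf]
  | cons c t ih =>
      rw [rfind_cons_raw]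
      obtain ⟨h1, h2⟩ := ih
      by_cases he : PySem.Chars.rfind t ['/'] = -1
      · have hm : '/' ∉ t := h2.mp he
        by_cases hc : c = '/'
        · simp [he, hc, hm]
        · simp [he, hc, hm, eq_comm]
      · have hm : '/' ∈ t := by by_contra hm; exact he (h2.mpr hm)
        simp only [he, if_false]
        refine ⟨by omega, ?_⟩
        constructor
        · intro h; omega
        · intro h; exact absurd (List.mem_cons_of_mem c hm) h

lemma rfind_cons (t : List Char) (c : Char) :
    PySem.Chars.rfind (c :: t) ['/'] =
      (if '/' ∈ t then PySem.Chars.rfind t ['/'] + 1 else if c = '/' then 0 else -1) := by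
  rw [rfind_cons_raw]
  by_cases hm : '/' ∈ t
  · have : ¬ PySem.Chars.rfind t ['/'] = -1 := fun h => (rfind_basic t).2.mp h hm
    simp [hm, this]
  · simp [hm, (rfind_basic t).2.mpr hm]

lemma drop_rfind (t : List Char) :
    List.drop (PySem.Chars.rfind t ['/'] + 1).toNat t = tailAfter t := by
  induction t with
  | nil => simp [tailAfter]
  | cons c t ih =>
      rw [rfind_cons]
      by_cases hm : '/' ∈ t
      · have h0 : 0 ≤ PySem.Chars.rfind t ['/'] := by
          have ha := (rfind_basic t).1
          have hb : ¬ PySem.Chars.rfind t ['/'] = -1 := fun h => (rfind_basic t).2.mp h hm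
          omega
        have hT : (PySem.Chars.rfind t ['/'] + 1 + 1).toNat =
            (PySem.Chars.rfind t ['/'] + 1).toNat + 1 := by omega
        simp [hm, tailAfter, hT, ih]
      · by_cases hc : c = '/' <;> simp [hm, hc, tailAfter]

-- A's per-token test is the predicate pTok
lemma token_test (tok : List Char) :
    (PySem.Str.slice (String.ofList tok)
        (some (PySem.Str.rfind (String.ofList tok) "/" + 1)) none ∈ (["nnp", "nnps"] : List String))
      ↔ pTok tok = true := by
  have hr : PySem.Str.rfind (String.ofList tok) "/" = PySem.Chars.rfind tok ['/'] := by
    simp [PySem.Str.rfind]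
  have hnn : 0 ≤ PySem.Chars.rfind tok ['/'] + 1 := by
    have := (rfind_basic tok).1; omega
  have hs : PySem.Str.slice (String.ofList tok)
      (some (PySem.Chars.rfind tok ['/'] + 1)) none = String.ofList (tailAfter tok) := by
    simp only [PySem.Str.slice, PySem.Chars.slice_eq_listSlice]
    rw [show (String.ofList tok).toList = tok by simp,
        PySem.List.slice_from _ hnn, drop_rfind]
  rw [hr, hs]
  have hofl : ∀ (x : List Char) (s : String), String.ofList x = s ↔ x = s.toList := by
    intro x s
    constructor
    · intro h; have := congrArg String.toList h; simpa using this
    · intro h; subst h; simp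
  simp [pTok, List.mem_cons, hofl]

-- B's scan over cs ++ [' '] counts exactly the matched tokens that split₀.go emits
lemma scan_go (cs : List Char) : ∀ (cur : List Char) (acc : List (List Char)) (count : Int),
    ((cs ++ [' ']).foldl
      (fun st c =>
        if PySem.Chars.isspace c then
          (if st.2 = "nnp".toList ∨ st.2 = "nnps".toList then st.1 + 1 else st.1, ([] : List Char))
        else if c = '/' then (st.1, [])
        else (st.1, st.2 ++ [c]))
      (count, tailAfter cur.reverse)).1 + (acc.countP pTok : Int)
    = count + ((PySem.Chars.split₀.go cs cur acc).countP pTok : Int) := by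
  induction cs with
  | nil =>
      intro cur acc count
      rw [show PySem.Chars.split₀.go [] cur acc =
            (if cur.isEmpty then acc.reverse else (cur.reverse :: acc).reverse) from rfl]
      cases cur with
      | nil =>
          simp [tailAfter, show PySem.Chars.isspace ' ' = true from rfl]
      | cons d cur' =>
          simp only [List.nil_append, List.foldl_cons, List.foldl_nil,
            show PySem.Chars.isspace ' ' = true from rfl, if_true, List.isEmpty_cons,
            Bool.false_eq_true, if_false, List.countP_reverse, List.countP_cons]
          generalize (d :: cur').reverse = tok
          by_cases hq : tailAfter tok = "nnp".toList ∨ tailAfter tok = "nnps".toList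
          · have hpq : pTok tok = true := by unfold pTok; exact decide_eq_true hq
            rw [if_pos hq, if_pos hpq]
            push_cast; ring
          · have hpq : ¬ pTok tok = true := by unfold pTok; simpa using hq
            rw [if_neg hq, if_neg hpq]
            push_cast; ring
  | cons c rest ih =>
      intro cur acc count
      rw [show PySem.Chars.split₀.go (c :: rest) cur acc =
            (if PySem.Chars.isspace c then
              (if cur.isEmpty then PySem.Chars.split₀.go rest [] acc
               else PySem.Chars.split₀.go rest [] (cur.reverse :: acc))
             else PySem.Chars.split₀.go rest (c :: cur) acc) from rfl]
      rw [List.cons_append, List.foldl_cons]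
      by_cases hsp : PySem.Chars.isspace c
      · simp only [hsp, if_true]
        cases cur with
        | nil =>
            rw [if_pos (show (List.isEmpty ([] : List Char)) = true from rfl)]
            have h0 : ¬ (tailAfter (([] : List Char).reverse) = "nnp".toList ∨
                tailAfter (([] : List Char).reverse) = "nnps".toList) := by
              simp [tailAfter]
            rw [if_neg h0]
            have := ih [] acc count
            rw [show tailAfter (([] : List Char).reverse) = [] from rfl] at this
            exact this
        | cons d cur' =>
            rw [if_neg (show ¬ (List.isEmpty (d :: cur')) = true by simp)]
            have key := ih [] (((d :: cur').reverse) :: acc)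
              (if tailAfter ((d :: cur').reverse) = "nnp".toList ∨
                  tailAfter ((d :: cur').reverse) = "nnps".toList then count + 1 else count)
            rw [show tailAfter (([] : List Char).reverse) = [] from rfl] at key
            rw [List.countP_cons] at key
            by_cases hq : tailAfter ((d :: cur').reverse) = "nnp".toList ∨
                tailAfter ((d :: cur').reverse) = "nnps".toList
            · have hpq : pTok ((d :: cur').reverse) = true := by
                unfold pTok; exact decide_eq_true hq
              rw [if_pos hq] at key ⊢
              rw [if_pos hpq] at key
              push_cast at key ⊢
              omega
            · have hpq : ¬ pTok ((d :: cur').reverse) = true := by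
                unfold pTok; simpa using hq
              rw [if_neg hq] at key ⊢
              rw [if_neg hpq] at key
              push_cast at key ⊢
              omega
      · simp only [hsp, Bool.false_eq_true, if_false]
        by_cases hc : c = '/'
        · rw [if_pos hc]
          have := ih (c :: cur) acc count
          rw [show tailAfter ((c :: cur).reverse) = [] by
                rw [List.reverse_cons, tailAfter_append, if_pos hc]] at this
          exact this
        · rw [if_neg hc]
          have := ih (c :: cur) acc count
          rw [show tailAfter ((c :: cur).reverse) = tailAfter cur.reverse ++ [c] by
                rw [List.reverse_cons, tailAfter_append, if_neg hc]] at this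
          exact this

-- ===== VERDICT (by name: the statement is the Claim_ definition above) =====
theorem feat13_spec : Claim_equal_feat13 := by
  intro tweet _
  unfold Spec_feat13 feat13 feat13_alt
  rw [PySem.List.foldl_ite_add_one]
  have hsplit : PySem.Str.split₀ (PySem.Str.lower tweet) =
      (PySem.Chars.split₀ (PySem.Str.lower tweet).toList).map String.ofList := rfl
  rw [hsplit, List.countP_map]
  have hc : List.countP
      ((fun token => decide (PySem.Str.slice token
          (some (PySem.Str.rfind token "/" + 1)) none ∈ (["nnp", "nnps"] : List String)))
        ∘ String.ofList)
      (PySem.Chars.split₀ (PySem.Str.lower tweet).toList)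
      = List.countP pTok (PySem.Chars.split₀ (PySem.Str.lower tweet).toList) := by
    apply List.countP_congr
    intro tok _
    simp only [Function.comp_apply, decide_eq_true_eq]
    rw [show (PySem.Str.slice (String.ofList tok)
          (some (PySem.Str.rfind (String.ofList tok) "/" + 1)) none ∈ (["nnp", "nnps"] : List String))
        = (pTok tok = true) from propext (token_test tok)]
  rw [hc]
  have := scan_go (PySem.Str.lower tweet).toList [] [] 0
  rw [show tailAfter (([] : List Char).reverse) = [] from rfl] at this
  simp only [List.countP_nil, Nat.cast_zero, add_zero, zero_add] at this
  rw [show PySem.Chars.split₀ (PySem.Str.lower tweet).toList =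
        PySem.Chars.split₀.go (PySem.Str.lower tweet).toList [] [] from rfl]
  omega
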